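-- pv_equiv track=rewrite | github.com/Carbondots/carbon_dots_mining | preprocess/04_tokenize_markdown.py | _second_pass_boundary_cut
-- ===== SOURCE A (Python) =====
-- from typing import Dict, List, Optional
--
-- def _second_pass_boundary_cut(sentence: str) -> List[str]:
--     parts: List[str] = []
--     start = 0
--     length = len(sentence)
--
--     while start < length:
--         idx = start
--         cut_done = False
--         while idx < length:
--             if sentence[idx] in ".?!;":
--                 after_punct = idx + 1
--                 while after_punct < length and sentence[after_punct] in ")]}\"'":
--                     after_punct += 1
--                 next_start = after_punct
--                 while next_start < length and sentence[next_start].isspace():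
--                     next_start += 1
--                 if next_start < length:
--                     next_char = sentence[next_start]
--                     if next_char.isupper() or next_char in "[(":
--                         chunk = sentence[start:after_punct].strip()
--                         if chunk:
--                             parts.append(chunk)
--                         start = next_start
--                         cut_done = True
--                         break
--             idx += 1
--
--         if not cut_done:
--             chunk = sentence[start:].strip()
--             if chunk:
--                 parts.append(chunk)
--             break
--
--     return parts
-- ===== SOURCE B (Python) =====
-- from typing import List
--
-- def _second_pass_boundary_cut(sentence: str) -> List[str]:
--     # One forward pass accumulating characters into a buffer; when a qualifying
--     # sentence boundary is found, flush the buffer as a chunk and jump past the gap.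
--     parts: List[str] = []
--     buf: List[str] = []
--     n = len(sentence)
--     i = 0
--     while i < n:
--         c = sentence[i]
--         if c in ".?!;":
--             j = i + 1
--             while j < n and sentence[j] in ")]}\"'":
--                 j += 1
--             k = j
--             while k < n and sentence[k].isspace():
--                 k += 1
--             if k < n and (sentence[k].isupper() or sentence[k] in "[("):
--                 buf.extend(sentence[i:j])
--                 chunk = "".join(buf).strip()
--                 if chunk:
--                     parts.append(chunk)
--                 buf = []
--                 i = k
--                 continue
--         buf.append(c)
--         i += 1
--     chunk = "".join(buf).strip()
--     if chunk:
--         parts.append(chunk)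
--     return parts
-- ===== Notes on version B (the rewrite author's own statement) =====
-- stated objective: alternative
-- what changed: A's outer while-loop that restarts an inner scan from each new chunk start and slices the sentence per chunk is replaced by a single forward pass that accumulates the current chunk character by character in a buffer and flushes it at each qualifying boundary.
import Mathlib
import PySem

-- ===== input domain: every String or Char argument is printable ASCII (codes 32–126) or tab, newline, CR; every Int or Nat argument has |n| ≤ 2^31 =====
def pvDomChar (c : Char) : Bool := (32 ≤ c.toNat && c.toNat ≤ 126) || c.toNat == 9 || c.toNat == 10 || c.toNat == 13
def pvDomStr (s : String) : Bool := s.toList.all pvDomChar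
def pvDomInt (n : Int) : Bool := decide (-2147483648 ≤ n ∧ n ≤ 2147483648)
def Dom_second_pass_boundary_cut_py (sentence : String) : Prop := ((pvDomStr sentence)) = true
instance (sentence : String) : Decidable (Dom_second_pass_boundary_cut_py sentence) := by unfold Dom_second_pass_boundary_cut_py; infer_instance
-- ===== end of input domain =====

-- B replaces A's restart-from-`start` outer/inner loop pair by a single forward pass that
-- accumulates the current chunk character by character in a buffer (objective: alternative).
-- All while-loops are ported as structural recursion on an explicit fuel counter, a totality
-- guard only: the supplied fuel always exceeds the number of iterations.  Python's local
-- variables after_punct / next_start / chunk appear inlined (each occurrence is the same value).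

-- shared character-class tests (the string literals ".?!;", ")]}\"'", "[(" of both Pythons)
def pvPunct (c : Char) : Bool := c = '.' || c = '?' || c = '!' || c = ';'
def pvCloser (c : Char) : Bool := c = ')' || c = ']' || c = '}' || c = '"' || c = '\''
def pvOpenB (c : Char) : Bool := c = '[' || c = '('

-- ===== PORT A =====
-- while after_punct < length and sentence[after_punct] in ")]}\"'": after_punct += 1
def pvSkipClosersA (cs : List Char) : Nat → Nat → Nat
  | 0, j => j
  | fuel + 1, j =>
    if j < cs.length ∧ pvCloser (cs.getD j ' ') = true then pvSkipClosersA cs fuel (j + 1) else j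

-- while next_start < length and sentence[next_start].isspace(): next_start += 1
def pvSkipSpaceA (cs : List Char) : Nat → Nat → Nat
  | 0, k => k
  | fuel + 1, k =>
    if k < cs.length ∧ PySem.Chars.isspace (cs.getD k ' ') = true then pvSkipSpaceA cs fuel (k + 1) else k

-- A's inner `while idx < length` loop: returns (after_punct, next_start) of the first
-- qualifying cut at position ≥ idx, or none (cut_done stays False).
def pvInnerA (cs : List Char) : Nat → Nat → Option (Nat × Nat)
  | 0, _ => none
  | fuel + 1, idx =>
    if idx < cs.length then
      if pvPunct (cs.getD idx ' ') then
        if pvSkipSpaceA cs cs.length (pvSkipClosersA cs cs.length (idx + 1)) < cs.length ∧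
            (PySem.Chars.isupper (cs.getD (pvSkipSpaceA cs cs.length (pvSkipClosersA cs cs.length (idx + 1))) ' ') ||
              pvOpenB (cs.getD (pvSkipSpaceA cs cs.length (pvSkipClosersA cs cs.length (idx + 1))) ' ')) = true then
          some (pvSkipClosersA cs cs.length (idx + 1),
                pvSkipSpaceA cs cs.length (pvSkipClosersA cs cs.length (idx + 1)))
        else pvInnerA cs fuel (idx + 1)
      else pvInnerA cs fuel (idx + 1)
    else none

-- A's outer `while start < length` loop (the inner loop is pvInnerA; parts.append becomes ++)
def pvOuterA (cs : List Char) : Nat → Nat → List String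
  | 0, _ => []
  | fuel + 1, start =>
    match pvInnerA cs cs.length start with
    | some (j, k) =>
        (if PySem.Chars.strip ((cs.drop start).take (j - start)) = [] then []
         else [String.ofList (PySem.Chars.strip ((cs.drop start).take (j - start)))]) ++
        pvOuterA cs fuel k
    | none =>
        if PySem.Chars.strip (cs.drop start) = [] then []
        else [String.ofList (PySem.Chars.strip (cs.drop start))]

def second_pass_boundary_cut_py (sentence : String) : List String :=
  pvOuterA sentence.toList (sentence.toList.length + 1) 0

-- ===== PORT B =====
-- while j < n and sentence[j] in ")]}\"'": j += 1
def pvSkipClosersB (cs : List Char) : Nat → Nat → Nat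
  | 0, j => j
  | fuel + 1, j =>
    if j < cs.length ∧ pvCloser (cs.getD j ' ') = true then pvSkipClosersB cs fuel (j + 1) else j

-- while k < n and sentence[k].isspace(): k += 1
def pvSkipSpaceB (cs : List Char) : Nat → Nat → Nat
  | 0, k => k
  | fuel + 1, k =>
    if k < cs.length ∧ PySem.Chars.isspace (cs.getD k ' ') = true then pvSkipSpaceB cs fuel (k + 1) else k

-- B's single `while i < n` pass: buf accumulates the current chunk; on a qualifying cut the
-- buffer (plus the punctuation-and-closers run sentence[i:j]) is flushed and i jumps to k.
def pvBloop (cs : List Char) : Nat → Nat → List Char → List String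
  | 0, _, _ => []
  | fuel + 1, i, buf =>
    if i < cs.length then
      if pvPunct (cs.getD i ' ') then
        if pvSkipSpaceB cs cs.length (pvSkipClosersB cs cs.length (i + 1)) < cs.length ∧
            (PySem.Chars.isupper (cs.getD (pvSkipSpaceB cs cs.length (pvSkipClosersB cs cs.length (i + 1))) ' ') ||
              pvOpenB (cs.getD (pvSkipSpaceB cs cs.length (pvSkipClosersB cs cs.length (i + 1))) ' ')) = true then
          (if PySem.Chars.strip (buf ++ (cs.drop i).take (pvSkipClosersB cs cs.length (i + 1) - i)) = [] then []
           else [String.ofList (PySem.Chars.strip (buf ++ (cs.drop i).take (pvSkipClosersB cs cs.length (i + 1) - i)))]) ++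
          pvBloop cs fuel (pvSkipSpaceB cs cs.length (pvSkipClosersB cs cs.length (i + 1))) []
        else pvBloop cs fuel (i + 1) (buf ++ [cs.getD i ' '])
      else pvBloop cs fuel (i + 1) (buf ++ [cs.getD i ' '])
    else
      if PySem.Chars.strip buf = [] then [] else [String.ofList (PySem.Chars.strip buf)]

def second_pass_boundary_cut_py_alt (sentence : String) : List String :=
  pvBloop sentence.toList (sentence.toList.length + 1) 0 []

-- ===== PRECONDITION & SPEC =====
def Spec_second_pass_boundary_cut_py (sentence : String) (out : List String) : Prop := out = second_pass_boundary_cut_py_alt sentence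
instance (sentence : String) (out : List String) : Decidable (Spec_second_pass_boundary_cut_py sentence out) := by unfold Spec_second_pass_boundary_cut_py; infer_instance

-- ===== CLAIM (what is proved, stated in full; the proofs are below) =====
def Claim_equal_second_pass_boundary_cut_py : Prop := ∀ (sentence : String), Dom_second_pass_boundary_cut_py sentence → Spec_second_pass_boundary_cut_py sentence (second_pass_boundary_cut_py sentence)

-- ===== LEMMAS AND PROOFS =====
theorem pvSkipClosersA_le (cs : List Char) : ∀ (f j : Nat), j ≤ pvSkipClosersA cs f j := by
  intro f
  induction f with
  | zero => intro j; rw [pvSkipClosersA]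
  | succ f ih =>
    intro j
    rw [pvSkipClosersA]
    split
    · have := ih (j + 1); omega
    · omega

theorem pvSkipSpaceA_le (cs : List Char) : ∀ (f k : Nat), k ≤ pvSkipSpaceA cs f k := by
  intro f
  induction f with
  | zero => intro k; rw [pvSkipSpaceA]
  | succ f ih =>
    intro k
    rw [pvSkipSpaceA]
    split
    · have := ih (k + 1); omega
    · omega

theorem pvSkipClosersB_eq (cs : List Char) : ∀ (f j : Nat), pvSkipClosersB cs f j = pvSkipClosersA cs f j := by
  intro f
  induction f with
  | zero => intro j; rw [pvSkipClosersB, pvSkipClosersA]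
  | succ f ih =>
    intro j
    rw [pvSkipClosersB, pvSkipClosersA]
    split
    · exact ih (j + 1)
    · rfl

theorem pvSkipSpaceB_eq (cs : List Char) : ∀ (f k : Nat), pvSkipSpaceB cs f k = pvSkipSpaceA cs f k := by
  intro f
  induction f with
  | zero => intro k; rw [pvSkipSpaceB, pvSkipSpaceA]
  | succ f ih =>
    intro k
    rw [pvSkipSpaceB, pvSkipSpaceA]
    split
    · exact ih (k + 1)
    · rfl

-- the qualifying-cut test at position idx (A's `if next_start < length and (…)` condition)
def pvCutQ (cs : List Char) (idx : Nat) : Prop :=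
  pvSkipSpaceA cs cs.length (pvSkipClosersA cs cs.length (idx + 1)) < cs.length ∧
    (PySem.Chars.isupper (cs.getD (pvSkipSpaceA cs cs.length (pvSkipClosersA cs cs.length (idx + 1))) ' ') ||
      pvOpenB (cs.getD (pvSkipSpaceA cs cs.length (pvSkipClosersA cs cs.length (idx + 1))) ' ')) = true

theorem pvInnerA_succ (cs : List Char) (f idx : Nat) :
    pvInnerA cs (f + 1) idx =
      if idx < cs.length then
        if pvPunct (cs.getD idx ' ') then
          if pvSkipSpaceA cs cs.length (pvSkipClosersA cs cs.length (idx + 1)) < cs.length ∧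
              (PySem.Chars.isupper (cs.getD (pvSkipSpaceA cs cs.length (pvSkipClosersA cs cs.length (idx + 1))) ' ') ||
                pvOpenB (cs.getD (pvSkipSpaceA cs cs.length (pvSkipClosersA cs cs.length (idx + 1))) ' ')) = true then
            some (pvSkipClosersA cs cs.length (idx + 1),
                  pvSkipSpaceA cs cs.length (pvSkipClosersA cs cs.length (idx + 1)))
          else pvInnerA cs f (idx + 1)
        else pvInnerA cs f (idx + 1)
      else none := by
  rw [pvInnerA]

theorem pvInnerA_facts (cs : List Char) : ∀ (f idx j k : Nat),
    pvInnerA cs f idx = some (j, k) → idx < j ∧ j ≤ k ∧ k < cs.length := by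
  intro f
  induction f with
  | zero => intro idx j k he; rw [pvInnerA] at he; exact absurd he (by simp)
  | succ f ih =>
    intro idx j k he
    rw [pvInnerA_succ] at he
    by_cases hi : idx < cs.length
    · rw [if_pos hi] at he
      by_cases hp : pvPunct (cs.getD idx ' ') = true
      · rw [if_pos hp] at he
        by_cases hq : pvCutQ cs idx
        · unfold pvCutQ at hq
          rw [if_pos hq] at he
          have hj := pvSkipClosersA_le cs cs.length (idx + 1)
          have hk := pvSkipSpaceA_le cs cs.length (pvSkipClosersA cs cs.length (idx + 1))
          simp only [Option.some.injEq, Prod.mk.injEq] at he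
          obtain ⟨hq1, _⟩ := hq
          omega
        · unfold pvCutQ at hq
          rw [if_neg hq] at he
          have := ih (idx + 1) j k he
          omega
      · rw [if_neg hp] at he
        have := ih (idx + 1) j k he
        omega
    · rw [if_neg hi] at he
      exact absurd he (by simp)

-- fuel irrelevance: any fuel ≥ cs.length - idx computes the true inner-loop value
theorem pvInnerA_irrel (cs : List Char) : ∀ (f g idx : Nat),
    cs.length - idx ≤ f → cs.length - idx ≤ g → pvInnerA cs f idx = pvInnerA cs g idx := by
  intro f
  induction f with
  | zero =>
    intro g idx hf _
    have hi : ¬ idx < cs.length := by omega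
    rw [pvInnerA]
    cases g with
    | zero => rw [pvInnerA]
    | succ g => rw [pvInnerA_succ, if_neg hi]
  | succ f ih =>
    intro g idx hf hg
    by_cases hi : idx < cs.length
    · cases g with
      | zero => omega
      | succ g =>
        rw [pvInnerA_succ, pvInnerA_succ, if_pos hi, if_pos hi]
        by_cases hp : pvPunct (cs.getD idx ' ') = true
        · rw [if_pos hp, if_pos hp]
          by_cases hq : pvCutQ cs idx
          all_goals unfold pvCutQ at hq
          · rw [if_pos hq, if_pos hq]
          · rw [if_neg hq, if_neg hq]
            exact ih g (idx + 1) (by omega) (by omega)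
        · rw [if_neg hp, if_neg hp]
          exact ih g (idx + 1) (by omega) (by omega)
    · cases g with
      | zero => rw [pvInnerA, pvInnerA_succ, if_neg hi]
      | succ g => rw [pvInnerA_succ, pvInnerA_succ, if_neg hi, if_neg hi]

-- the inner-loop value with always-sufficient fuel
def pvInnerW (cs : List Char) (idx : Nat) : Option (Nat × Nat) := pvInnerA cs cs.length idx

theorem pvInnerW_none (cs : List Char) (idx : Nat) (hi : ¬ idx < cs.length) :
    pvInnerW cs idx = none := by
  unfold pvInnerW
  cases h : cs.length with
  | zero => rw [pvInnerA]
  | succ l =>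
    rw [pvInnerA_succ, if_neg hi]

theorem pvInnerW_cut (cs : List Char) (idx : Nat) (hi : idx < cs.length)
    (hp : pvPunct (cs.getD idx ' ') = true) (hq : pvCutQ cs idx) :
    pvInnerW cs idx = some (pvSkipClosersA cs cs.length (idx + 1),
      pvSkipSpaceA cs cs.length (pvSkipClosersA cs cs.length (idx + 1))) := by
  unfold pvInnerW
  obtain ⟨l, hl⟩ : ∃ l, cs.length = l + 1 := ⟨cs.length - 1, by omega⟩
  have h1 : pvInnerA cs cs.length idx = pvInnerA cs (l + 1) idx := by rw [hl]
  unfold pvCutQ at hq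
  rw [h1, pvInnerA_succ, if_pos hi, if_pos hp, if_pos hq]

theorem pvInnerW_step (cs : List Char) (idx : Nat) (hi : idx < cs.length)
    (hskip : pvPunct (cs.getD idx ' ') = false ∨ ¬ pvCutQ cs idx) :
    pvInnerW cs idx = pvInnerW cs (idx + 1) := by
  unfold pvInnerW
  obtain ⟨l, hl⟩ : ∃ l, cs.length = l + 1 := ⟨cs.length - 1, by omega⟩
  have h1 : pvInnerA cs cs.length idx = pvInnerA cs (l + 1) idx := by rw [hl]
  rw [h1, pvInnerA_succ, if_pos hi]
  have h2 : pvInnerA cs l (idx + 1) = pvInnerA cs cs.length (idx + 1) :=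
    pvInnerA_irrel cs l cs.length (idx + 1) (by omega) (by omega)
  by_cases hp : pvPunct (cs.getD idx ' ') = true
  · rw [if_pos hp]
    have hq : ¬ pvCutQ cs idx := by
      rcases hskip with h | h
      · rw [hp] at h; exact absurd h (by simp)
      · exact h
    unfold pvCutQ at hq
    rw [if_neg hq, h2]
  · rw [if_neg hp, h2]

theorem pvOuterA_irrel (cs : List Char) : ∀ (f g start : Nat),
    cs.length - start < f → cs.length - start < g → pvOuterA cs f start = pvOuterA cs g start := by
  intro f
  induction f with
  | zero => intro g start hf; omega
  | succ f ih =>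
    intro g start hf hg
    cases g with
    | zero => omega
    | succ g =>
      rw [pvOuterA, pvOuterA]
      cases h : pvInnerA cs cs.length start with
      | none => rfl
      | some jk =>
        obtain ⟨j, k⟩ := jk
        have hfacts := pvInnerA_facts cs cs.length start j k h
        dsimp only
        rw [ih g k (by omega) (by omega)]

-- the remainder of A's output from the state (start, idx) of the outer/inner loop pair
def pvAfrom (cs : List Char) (start idx : Nat) : List String :=
  match pvInnerW cs idx with
  | some (j, k) =>
      (if PySem.Chars.strip ((cs.drop start).take (j - start)) = [] then []
       else [String.ofList (PySem.Chars.strip ((cs.drop start).take (j - start)))]) ++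
      pvOuterA cs (cs.length + 1) k
  | none =>
      if PySem.Chars.strip (cs.drop start) = [] then []
      else [String.ofList (PySem.Chars.strip (cs.drop start))]

theorem pvOuterA_eq_afrom (cs : List Char) (start : Nat) :
    pvOuterA cs (cs.length + 1) start = pvAfrom cs start start := by
  rw [pvOuterA, pvAfrom]
  unfold pvInnerW
  cases h : pvInnerA cs cs.length start with
  | none => rfl
  | some jk =>
    obtain ⟨j, k⟩ := jk
    have hfacts := pvInnerA_facts cs cs.length start j k h
    dsimp only
    rw [pvOuterA_irrel cs cs.length (cs.length + 1) k (by omega) (by omega)]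

-- segment concatenation: s[start:i] ++ s[i:j] = s[start:j]
theorem pvSeg_append (cs : List Char) (start i j : Nat) (h1 : start ≤ i) (h2 : i ≤ j) :
    (cs.drop start).take (i - start) ++ (cs.drop i).take (j - i) =
      (cs.drop start).take (j - start) := by
  have h3 : j - start = (i - start) + (j - i) := by omega
  have h4 : start + (i - start) = i := by omega
  rw [h3, List.take_add, List.drop_drop, h4]

theorem pvSeg_snoc (cs : List Char) (start i : Nat) (h1 : start ≤ i) (h2 : i < cs.length) :
    (cs.drop start).take (i - start) ++ [cs.getD i ' '] =
      (cs.drop start).take (i + 1 - start) := by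
  have h3 : (cs.drop i).take 1 = [cs.getD i ' '] := by
    rw [List.getD_eq_getElem cs ' ' h2]
    rw [List.take_one, List.head?_drop]
    simp [List.getElem?_eq_getElem h2]
  calc (cs.drop start).take (i - start) ++ [cs.getD i ' ']
      = (cs.drop start).take (i - start) ++ (cs.drop i).take 1 := by rw [h3]
    _ = (cs.drop start).take (i + 1 - start) := by
          have h4 := pvSeg_append cs start i (i + 1) h1 (by omega)
          simpa using h4

theorem pvSeg_full (cs : List Char) (start i : Nat) (h : cs.length ≤ i) :
    (cs.drop start).take (i - start) = cs.drop start := by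
  apply List.take_of_length_le
  simp
  omega

theorem pvBloop_succ (cs : List Char) (f i : Nat) (buf : List Char) :
    pvBloop cs (f + 1) i buf =
      if i < cs.length then
        if pvPunct (cs.getD i ' ') then
          if pvSkipSpaceB cs cs.length (pvSkipClosersB cs cs.length (i + 1)) < cs.length ∧
              (PySem.Chars.isupper (cs.getD (pvSkipSpaceB cs cs.length (pvSkipClosersB cs cs.length (i + 1))) ' ') ||
                pvOpenB (cs.getD (pvSkipSpaceB cs cs.length (pvSkipClosersB cs cs.length (i + 1))) ' ')) = true then
            (if PySem.Chars.strip (buf ++ (cs.drop i).take (pvSkipClosersB cs cs.length (i + 1) - i)) = [] then []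
             else [String.ofList (PySem.Chars.strip (buf ++ (cs.drop i).take (pvSkipClosersB cs cs.length (i + 1) - i)))]) ++
            pvBloop cs f (pvSkipSpaceB cs cs.length (pvSkipClosersB cs cs.length (i + 1))) []
          else pvBloop cs f (i + 1) (buf ++ [cs.getD i ' '])
        else pvBloop cs f (i + 1) (buf ++ [cs.getD i ' '])
      else
        if PySem.Chars.strip buf = [] then [] else [String.ofList (PySem.Chars.strip buf)] := by
  rw [pvBloop]

theorem pvMain (cs : List Char) : ∀ (m fb i start : Nat) (buf : List Char),
    cs.length - i ≤ m → cs.length - i < fb → start ≤ i →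
    buf = (cs.drop start).take (i - start) →
    pvBloop cs fb i buf = pvAfrom cs start i := by
  intro m
  induction m with
  | zero =>
    intro fb i start buf hm hfb hsi hbuf
    have hi : ¬ i < cs.length := by omega
    obtain ⟨fb', rfl⟩ : ∃ fb', fb = fb' + 1 := ⟨fb - 1, by omega⟩
    rw [pvBloop_succ, if_neg hi, pvAfrom, pvInnerW_none cs i hi, hbuf,
      pvSeg_full cs start i (by omega)]
  | succ m ih =>
    intro fb i start buf hm hfb hsi hbuf
    obtain ⟨fb', rfl⟩ : ∃ fb', fb = fb' + 1 := ⟨fb - 1, by omega⟩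
    by_cases hi : i < cs.length
    · rw [pvBloop_succ, if_pos hi]
      simp only [pvSkipClosersB_eq, pvSkipSpaceB_eq]
      by_cases hp : pvPunct (cs.getD i ' ') = true
      · rw [if_pos hp]
        by_cases hq : pvCutQ cs i
        · have hq' := hq
          unfold pvCutQ at hq'
          rw [if_pos hq']
          have hij : i + 1 ≤ pvSkipClosersA cs cs.length (i + 1) := pvSkipClosersA_le cs cs.length (i + 1)
          have hbufseg : buf ++ (cs.drop i).take (pvSkipClosersA cs cs.length (i + 1) - i) =
              (cs.drop start).take (pvSkipClosersA cs cs.length (i + 1) - start) := by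
            rw [hbuf]; exact pvSeg_append cs start i (pvSkipClosersA cs cs.length (i + 1)) hsi (by omega)
          rw [pvAfrom, pvInnerW_cut cs i hi hp hq]
          dsimp only
          rw [hbufseg]
          have hjk := pvSkipSpaceA_le cs cs.length (pvSkipClosersA cs cs.length (i + 1))
          have htail : pvBloop cs fb' (pvSkipSpaceA cs cs.length (pvSkipClosersA cs cs.length (i + 1))) [] =
              pvOuterA cs (cs.length + 1) (pvSkipSpaceA cs cs.length (pvSkipClosersA cs cs.length (i + 1))) := by
            rw [ih fb' _ _ [] (by omega) (by omega) (le_refl _) (by simp), pvOuterA_eq_afrom]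
          rw [htail]
        · have hq' : ¬ (pvSkipSpaceA cs cs.length (pvSkipClosersA cs cs.length (i + 1)) < cs.length ∧
              (PySem.Chars.isupper (cs.getD (pvSkipSpaceA cs cs.length (pvSkipClosersA cs cs.length (i + 1))) ' ') ||
                pvOpenB (cs.getD (pvSkipSpaceA cs cs.length (pvSkipClosersA cs cs.length (i + 1))) ' ')) = true) := by
            intro hc; exact hq hc
          rw [if_neg hq']
          have hA : pvAfrom cs start i = pvAfrom cs start (i + 1) := by
            rw [pvAfrom, pvAfrom, pvInnerW_step cs i hi (Or.inr hq)]
          rw [hA]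
          exact ih fb' (i + 1) start (buf ++ [cs.getD i ' ']) (by omega) (by omega) (by omega)
            (by rw [hbuf]; exact pvSeg_snoc cs start i hsi hi)
      · rw [if_neg hp]
        have hA : pvAfrom cs start i = pvAfrom cs start (i + 1) := by
          rw [pvAfrom, pvAfrom, pvInnerW_step cs i hi (Or.inl (by simpa using hp))]
        rw [hA]
        exact ih fb' (i + 1) start (buf ++ [cs.getD i ' ']) (by omega) (by omega) (by omega)
          (by rw [hbuf]; exact pvSeg_snoc cs start i hsi hi)
    · rw [pvBloop_succ, if_neg hi, pvAfrom, pvInnerW_none cs i hi, hbuf,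
        pvSeg_full cs start i (by omega)]

-- ===== VERDICT (by name: the statement is the Claim_ definition above) =====
theorem second_pass_boundary_cut_py_spec : Claim_equal_second_pass_boundary_cut_py := by
  intro sentence _
  unfold Spec_second_pass_boundary_cut_py second_pass_boundary_cut_py second_pass_boundary_cut_py_alt
  rw [pvMain sentence.toList sentence.toList.length (sentence.toList.length + 1) 0 0 []
      (by omega) (by omega) (le_refl 0) (by simp),
    pvOuterA_eq_afrom]
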